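-- pv_equiv track=rewrite | github.com/Mustafasohail7/Classical-Tabla-Music-Composition-with-Evolutionary-Algorithms | EA/Tabla.py | get_repeated_sequences
-- ===== SOURCE A (Python) =====
-- def get_repeated_sequences(chromosome):
--     '''
--     Identifies repeated sequences of the same bol (sound) in a chromosome and returns their details.
--         Args:
--             chromosome (list): A list of tuples representing the chromosome, where each tuple contains a bol (sound name), interval, and volume.
--
--         Returns:
--             list: A list of tuples, each containing the repeated bol, the length of the repetition, and the starting index of the sequence in the chromosome.
--     '''
--     sequence_info = []
--     i = 0
--     while i < len(chromosome):
--         current_bol = chromosome[i][0]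
--         length = 1
--         while i + 1 < len(chromosome) and chromosome[i + 1][0] == current_bol:
--             length += 1
--             i += 1
--         if length > 1:
--             sequence_info.append((current_bol, length, i - length + 1))
--         i += 1
--     return sequence_info
-- ===== SOURCE B (Python) =====
-- def get_repeated_sequences(chromosome):
--     n = len(chromosome)
--     boundaries = [i for i in range(n)
--                   if i == 0 or chromosome[i][0] != chromosome[i - 1][0]]
--     boundaries.append(n)
--     return [(chromosome[s][0], e - s, s)
--             for s, e in zip(boundaries, boundaries[1:])
--             if e - s > 1]
-- ===== Notes on version B (the rewrite author's own statement) =====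
-- stated objective: alternative
-- what changed: Replaces A's nested index-walking while-loops (run counting with an accumulator) by two staged passes: first collect the group-boundary indices by comparing each element with its predecessor, then zip consecutive boundaries into segments and keep those of length > 1.
import Mathlib
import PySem

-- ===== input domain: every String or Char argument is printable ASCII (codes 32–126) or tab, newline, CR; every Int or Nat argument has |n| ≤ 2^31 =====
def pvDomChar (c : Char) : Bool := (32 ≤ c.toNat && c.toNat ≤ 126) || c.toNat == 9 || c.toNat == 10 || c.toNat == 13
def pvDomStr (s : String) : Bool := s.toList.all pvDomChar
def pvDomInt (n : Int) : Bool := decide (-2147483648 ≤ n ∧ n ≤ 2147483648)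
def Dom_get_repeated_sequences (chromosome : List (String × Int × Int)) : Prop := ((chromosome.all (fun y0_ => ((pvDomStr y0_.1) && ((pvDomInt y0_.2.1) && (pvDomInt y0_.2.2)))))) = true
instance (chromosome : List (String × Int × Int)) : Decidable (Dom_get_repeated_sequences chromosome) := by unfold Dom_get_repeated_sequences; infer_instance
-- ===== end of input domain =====

-- B replaces A's nested index-walking while-loops by two staged passes: collect group-boundary indices, then zip consecutive boundaries into segments; alternative decomposition, same cost.


-- ===== PORT A =====
-- inner while: 'while i + 1 < len(chromosome) and chromosome[i+1][0] == current_bol: length += 1; i += 1'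
-- (index i+1 is checked in range by the guard, so getD's default is never used)
def aInner (c : List (String × Int × Int)) (bol : String) (i len : Nat) : Nat × Nat :=
  if i + 1 < c.length ∧ (c.getD (i + 1) ("", 0, 0)).1 = bol then
    aInner c bol (i + 1) (len + 1)
  else (len, i)
termination_by c.length - i

-- lower bound on the returned index (needed for aOuter's termination)
theorem aInner_snd_ge (c : List (String × Int × Int)) (bol : String) :
    ∀ (k i len : Nat), c.length - i ≤ k → i ≤ (aInner c bol i len).2 := by
  intro k
  induction k with
  | zero =>
    intro i len hk
    rw [aInner, if_neg (by intro ⟨h1, _⟩; omega)]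
  | succ k ih =>
    intro i len hk
    rw [aInner]
    split_ifs with hg
    · have := ih (i + 1) (len + 1) (by omega)
      omega
    · exact Nat.le_refl i

-- outer while over index i (chromosome[i] is in range by the loop guard)
def aOuter (c : List (String × Int × Int)) (i : Nat) (acc : List (String × Int × Int)) : List (String × Int × Int) :=
  if h : i < c.length then
    let bol := (c.getD i ("", 0, 0)).1
    let r := aInner c bol i 1
    let acc' := if r.1 > 1 then acc ++ [(bol, (r.1 : Int), (r.2 : Int) - (r.1 : Int) + 1)] else acc
    aOuter c (r.2 + 1) acc'
  else acc
termination_by c.length - i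
decreasing_by
  have := aInner_snd_ge c ((c.getD i ("", 0, 0)).1) c.length i 1 (by omega)
  omega

def get_repeated_sequences (chromosome : List (String × Int × Int)) : List (String × Int × Int) :=
  aOuter chromosome 0 []

-- ===== PORT B =====
-- pass 1: '[i for i in range(n) if i == 0 or chromosome[i][0] != chromosome[i-1][0]] + [n]'
-- (indices i and i-1 are in range whenever the lookups are reached, so getD's default is never used)
def bBoundaries (c : List (String × Int × Int)) : List Nat :=
  ((List.range c.length).filter
    (fun i => (i == 0) || ((c.getD i ("", 0, 0)).1 != (c.getD (i - 1) ("", 0, 0)).1))) ++ [c.length]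

-- pass 2: '[(chromosome[s][0], e - s, s) for s, e in zip(boundaries, boundaries[1:]) if e - s > 1]'
def get_repeated_sequences_alt (chromosome : List (String × Int × Int)) : List (String × Int × Int) :=
  let bs := bBoundaries chromosome
  (bs.zip bs.tail).filterMap
    (fun se => if se.2 - se.1 > 1 then
        some ((chromosome.getD se.1 ("", 0, 0)).1, (se.2 : Int) - (se.1 : Int), (se.1 : Int))
      else none)

-- ===== PRECONDITION & SPEC =====
def Spec_get_repeated_sequences (chromosome : List (String × Int × Int)) (out : List (String × Int × Int)) : Prop := out = get_repeated_sequences_alt chromosome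
instance (chromosome : List (String × Int × Int)) (out : List (String × Int × Int)) : Decidable (Spec_get_repeated_sequences chromosome out) := by unfold Spec_get_repeated_sequences; infer_instance

-- ===== CLAIM (what is proved, stated in full; the proofs are below) =====
def Claim_equal_get_repeated_sequences : Prop := ∀ (chromosome : List (String × Int × Int)), Dom_get_repeated_sequences chromosome → Spec_get_repeated_sequences chromosome (get_repeated_sequences chromosome)

-- ===== LEMMAS AND PROOFS =====

-- proof-side helper: length of the leading run of bol, and the remainder
def span1 (bol : String) : List (String × Int × Int) → Nat × List (String × Int × Int)
  | [] => (0, [])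
  | (b, x, y) :: rest =>
    if b = bol then
      let r := span1 bol rest
      (r.1 + 1, r.2)
    else (0, (b, x, y) :: rest)

theorem span1_len_le (bol : String) (l : List (String × Int × Int)) : (span1 bol l).2.length ≤ l.length := by
  induction l with
  | nil => simp [span1]
  | cons h t ih =>
    obtain ⟨b, x, y⟩ := h
    by_cases hb : b = bol <;> simp [span1, hb]
    omega

theorem span1_fst_le (bol : String) (l : List (String × Int × Int)) : (span1 bol l).1 ≤ l.length := by
  induction l with
  | nil => simp [span1]
  | cons h t ih =>
    obtain ⟨b, x, y⟩ := h
    by_cases hb : b = bol <;> simp [span1, hb]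
    omega

-- every element of the leading run has bol b
theorem span1_take (bol : String) (l : List (String × Int × Int)) :
    ∀ j < (span1 bol l).1, (l.getD j ("", 0, 0)).1 = bol := by
  induction l with
  | nil => simp [span1]
  | cons h t ih =>
    obtain ⟨b, x, y⟩ := h
    by_cases hb : b = bol
    · intro j hj
      simp only [span1, if_pos hb] at hj
      cases j with
      | zero => simpa using hb
      | succ j => exact ih j (by omega)
    · simp [span1, hb]

theorem span1_drop (bol : String) (l : List (String × Int × Int)) :
    l.drop (span1 bol l).1 = (span1 bol l).2 := by
  induction l with
  | nil => simp [span1]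
  | cons h t ih =>
    obtain ⟨b, x, y⟩ := h
    by_cases hb : b = bol <;> simp [span1, hb, ih]

-- the run stops: the remainder's head (if any) has a different bol
theorem span1_stop (bol : String) (l : List (String × Int × Int)) :
    ∀ p ∈ (span1 bol l).2.head?, p.1 ≠ bol := by
  induction l with
  | nil => simp [span1]
  | cons h t ih =>
    obtain ⟨b, x, y⟩ := h
    by_cases hb : b = bol
    · simpa [span1, hb] using ih
    · simp [span1, hb]

-- A's inner while starting at index i computes exactly span1 on the suffix after index i
theorem aInner_spec (xs : List (String × Int × Int)) (bol : String) :
    ∀ (rest : List (String × Int × Int)) (i len : Nat), xs.drop (i + 1) = rest →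
      aInner xs bol i len = (len + (span1 bol rest).1, i + (span1 bol rest).1) ∧
      xs.drop (i + (span1 bol rest).1 + 1) = (span1 bol rest).2 := by
  intro rest
  induction rest with
  | nil =>
    intro i len hd
    have hlen : ¬ (i + 1 < xs.length) := by
      intro hlt
      have := List.drop_eq_nil_iff.mp hd
      omega
    rw [aInner, if_neg (by intro ⟨h1, _⟩; exact hlen h1)]
    simp [span1, hd]
  | cons hd tl ih =>
    intro i len hdrop
    obtain ⟨b, x, y⟩ := hd
    have hlt : i + 1 < xs.length := by
      by_contra hge
      have : xs.drop (i + 1) = [] := List.drop_eq_nil_iff.mpr (by omega)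
      simp [this] at hdrop
    have hget : xs.getD (i + 1) ("", 0, 0) = (b, x, y) := by
      have h0 : xs[i + 1]? = some (b, x, y) := by
        have := congrArg (fun l => l[0]?) hdrop
        simpa [List.getElem?_drop] using this
      simp [List.getD, h0]
    have hdrop2 : xs.drop (i + 1 + 1) = tl := by
      have h2 := congrArg (List.drop 1) hdrop
      rw [List.drop_drop] at h2
      simpa using h2
    by_cases hb : b = bol
    · subst hb
      rw [aInner, if_pos ⟨hlt, by rw [hget]⟩]
      obtain ⟨h1, h2⟩ := ih (i + 1) (len + 1) hdrop2
      have hs1 : (span1 b ((b, x, y) :: tl)).1 = (span1 b tl).1 + 1 := by simp [span1]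
      have hs2 : (span1 b ((b, x, y) :: tl)).2 = (span1 b tl).2 := by simp [span1]
      rw [hs1, hs2, h1]
      refine ⟨by rw [Prod.mk.injEq]; exact ⟨by omega, by omega⟩, ?_⟩
      rw [show i + ((span1 b tl).1 + 1) + 1 = i + 1 + (span1 b tl).1 + 1 from by omega]
      exact h2
    · rw [aInner, if_neg (by intro ⟨_, hg⟩; rw [hget] at hg; exact hb hg)]
      simp [span1, hb, hdrop]

-- proof-side helper: run-length view of the result (one emission per group)
def bGo (start : Nat) : List (String × Int × Int) → List (String × Int × Int)
  | [] => []
  | (b, x, y) :: rest =>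
    let r := span1 b rest
    let length := r.1 + 1
    (if length > 1 then [(b, (length : Int), (start : Int))] else []) ++ bGo (start + length) r.2
termination_by l => l.length
decreasing_by
  have := span1_len_le b rest
  simp_all

-- A's outer loop from index i equals acc ++ the run-length pass over the suffix from i
theorem aOuter_eq_bGo (xs : List (String × Int × Int)) :
    ∀ (k i : Nat) (acc : List (String × Int × Int)), xs.length - i ≤ k →
      aOuter xs i acc = acc ++ bGo i (xs.drop i) := by
  intro k
  induction k with
  | zero =>
    intro i acc hk
    rw [aOuter, dif_neg (by omega : ¬ i < xs.length), List.drop_eq_nil_iff.mpr (by omega),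
      bGo.eq_def, List.append_nil]
  | succ k ih =>
    intro i acc hk
    by_cases hlt : i < xs.length
    · obtain ⟨⟨b, x, y⟩, hbx⟩ : ∃ p, xs[i]? = some p := ⟨xs[i], List.getElem?_eq_getElem hlt⟩
      have hget : xs.getD i ("", 0, 0) = (b, x, y) := by simp [List.getD, hbx]
      have hdrop : xs.drop i = (b, x, y) :: xs.drop (i + 1) := by
        rw [List.drop_eq_getElem_cons hlt]
        simp [(List.getElem?_eq_some_iff.mp hbx).2]
      obtain ⟨h1, h2⟩ := aInner_spec xs b (xs.drop (i + 1)) i 1 rfl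
      set n := (span1 b (xs.drop (i + 1))).1 with hn
      rw [aOuter, dif_pos hlt]
      simp only [hget, h1]
      rw [ih (i + n + 1) _ (by omega), h2, hdrop]
      have hbgo : bGo i ((b, x, y) :: List.drop (i + 1) xs) =
          (if n + 1 > 1 then [(b, ((n + 1 : Nat) : Int), (i : Int))] else []) ++
            bGo (i + (n + 1)) (span1 b (List.drop (i + 1) xs)).2 := by
        rw [bGo.eq_def]
      rw [hbgo]
      have harr : i + n + 1 = i + (n + 1) := by omega
      by_cases hgt : n + 1 > 1
      · rw [if_pos (by omega : 1 + n > 1), if_pos hgt, List.append_assoc, harr]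
        congr 2
        simp only [List.cons.injEq, Prod.mk.injEq, and_true]
        exact ⟨trivial, by push_cast; ring, by push_cast; ring⟩
      · rw [if_neg (by omega : ¬ 1 + n > 1), if_neg hgt, List.nil_append, harr]
    · rw [aOuter, dif_neg hlt, List.drop_eq_nil_iff.mpr (by omega), bGo.eq_def, List.append_nil]

-- proof-side helper: the list of group start indices of the suffix
def gStarts (off : Nat) : List (String × Int × Int) → List Nat
  | [] => []
  | (b, _, _) :: rest => off :: gStarts (off + (span1 b rest).1 + 1) (span1 b rest).2
termination_by l => l.length
decreasing_by
  have := span1_len_le b rest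
  simp_all

-- getD on a suffix
theorem getD_drop (xs : List (String × Int × Int)) (i j : Nat) (l : List (String × Int × Int))
    (hd : xs.drop i = l) (hj : j < l.length) :
    xs.getD (i + j) ("", 0, 0) = l.getD j ("", 0, 0) := by
  have : xs[i + j]? = l[j]? := by
    rw [← hd, List.getElem?_drop]
  simp [List.getD, this]

-- pass 1 computes the group starts: the filtered range from a group start equals gStarts
theorem filter_range_eq_gStarts (xs : List (String × Int × Int)) :
    ∀ (fuel : Nat) (l : List (String × Int × Int)) (i : Nat), l.length ≤ fuel → xs.drop i = l →
      (i = 0 ∨ (xs.getD i ("", 0, 0)).1 ≠ (xs.getD (i - 1) ("", 0, 0)).1) →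
      (List.range' i (xs.length - i)).filter
        (fun t => (t == 0) || ((xs.getD t ("", 0, 0)).1 != (xs.getD (t - 1) ("", 0, 0)).1))
        = gStarts i l := by
  intro fuel
  induction fuel with
  | zero =>
    intro l i hf hd _
    match l, hf, hd with
    | [], _, hd =>
      have : xs.length - i = 0 := by
        have := List.drop_eq_nil_iff.mp hd; omega
      simp [this, gStarts]
  | succ fuel ih =>
    intro l i hf hd hstart
    match l, hd with
    | [], hd =>
      have : xs.length - i = 0 := by
        have := List.drop_eq_nil_iff.mp hd; omega
      simp [this, gStarts]
    | (b, x, y) :: rest, hd =>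
      have hlt : i < xs.length := by
        by_contra hge
        have : xs.drop i = [] := List.drop_eq_nil_iff.mpr (by omega)
        simp [this] at hd
      have hlen : xs.length - i = rest.length + 1 := by
        have := congrArg List.length hd
        simp at this; omega
      set k := (span1 b rest).1 with hk
      set rest' := (span1 b rest).2 with hr
      have hdropr : xs.drop (i + 1) = rest := by
        have h2 := congrArg (List.drop 1) hd
        rw [List.drop_drop] at h2
        simpa using h2
      have hdrop' : xs.drop (i + (k + 1)) = rest' := by
        have := congrArg (List.drop k) hdropr
        rw [List.drop_drop, span1_drop] at this
        rw [show i + (k + 1) = i + 1 + k from by omega]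
        simpa [← hr, ← hk] using this
      have hlen' : xs.length - (i + (k + 1)) = rest'.length := by
        have := congrArg List.length hdrop'
        simp at this
        omega
      have hkle : k ≤ rest.length := by rw [hk]; exact span1_fst_le b rest
      -- split the range at the next group start i + k + 1
      have hsplit : List.range' i (xs.length - i) =
          List.range' i (k + 1) ++ List.range' (i + (k + 1)) (rest'.length) := by
        rw [List.range'_append_1]
        congr 1
        omega
      rw [hsplit, List.filter_append]
      -- getD facts inside the run
      have hget0 : xs.getD i ("", 0, 0) = (b, x, y) := by
        have := getD_drop xs i 0 _ hd (by simp)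
        simpa using this
      have hgetrun : ∀ j < k, (xs.getD (i + 1 + j) ("", 0, 0)).1 = b := by
        intro j hj
        rw [getD_drop xs (i + 1) j rest hdropr (by omega)]
        exact span1_take b rest j hj
      -- first block filters to [i]
      have hfirst : (List.range' i (k + 1)).filter
          (fun t => (t == 0) || ((xs.getD t ("", 0, 0)).1 != (xs.getD (t - 1) ("", 0, 0)).1)) = [i] := by
        rw [List.range'_succ, List.filter_cons]
        have hPi : ((i == 0) || ((xs.getD i ("", 0, 0)).1 != (xs.getD (i - 1) ("", 0, 0)).1)) = true := by
          rcases hstart with h | h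
          · simp [h]
          · simp only [Bool.or_eq_true, beq_iff_eq, bne_iff_ne, ne_eq]
            exact Or.inr h
        rw [if_pos hPi]
        have hrest0 : (List.range' (i + 1) k).filter
            (fun t => (t == 0) || ((xs.getD t ("", 0, 0)).1 != (xs.getD (t - 1) ("", 0, 0)).1)) = [] := by
          rw [List.filter_eq_nil_iff]
          intro t ht
          rw [List.mem_range'_1] at ht
          obtain ⟨h1, h2⟩ := ht
          have hcur : (xs.getD t ("", 0, 0)).1 = b := by
            rw [show t = i + 1 + (t - i - 1) from by omega]
            exact hgetrun (t - i - 1) (by omega)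
          have hprev : (xs.getD (t - 1) ("", 0, 0)).1 = b := by
            by_cases hti : t - 1 = i
            · rw [hti, hget0]
            · rw [show t - 1 = i + 1 + (t - i - 2) from by omega]
              exact hgetrun (t - i - 2) (by omega)
          simp only [Bool.or_eq_true, beq_iff_eq, bne_iff_ne, ne_eq, not_or, not_not]
          exact ⟨by omega, by rw [hcur, hprev]⟩
        rw [hrest0]
      rw [hfirst]
      -- second block: recurse on rest'
      have hsecond : (List.range' (i + (k + 1)) (rest'.length)).filter
          (fun t => (t == 0) || ((xs.getD t ("", 0, 0)).1 != (xs.getD (t - 1) ("", 0, 0)).1))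
          = gStarts (i + (k + 1)) rest' := by
        match hrnil : rest' with
        | [] => simp [gStarts]
        | p :: rest'' =>
          have hstart' : i + (k + 1) = 0 ∨
              (xs.getD (i + (k + 1)) ("", 0, 0)).1 ≠ (xs.getD (i + (k + 1) - 1) ("", 0, 0)).1 := by
            right
            have hh : (xs.getD (i + (k + 1)) ("", 0, 0)).1 = p.1 := by
              have h0 := getD_drop xs (i + (k + 1)) 0 _ hdrop' (by simp)
              simp at h0
              simp [List.getD, h0]
            have hp : p.1 ≠ b := by
              apply span1_stop b rest
              rw [← hr]; simp
            have hprev : (xs.getD (i + (k + 1) - 1) ("", 0, 0)).1 = b := by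
              by_cases hk0 : k = 0
              · rw [show i + (k + 1) - 1 = i from by omega, hget0]
              · rw [show i + (k + 1) - 1 = i + 1 + (k - 1) from by omega]
                exact hgetrun (k - 1) (by omega)
            rw [hh, hprev]
            exact hp
          have hflen : (p :: rest'').length ≤ fuel := by
            have h1 : (p :: rest'').length ≤ rest.length := by
              rw [hr]; exact span1_len_le b rest
            simp at hf
            simp at h1 ⊢
            omega
          have := ih (p :: rest'') (i + (k + 1)) hflen hdrop' hstart'
          rw [← hlen']
          exact this
      rw [hsecond, gStarts]
      simp only [List.cons_append, List.nil_append, ← hk, ← hr]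
      rw [show i + (k + 1) = i + k + 1 from by omega]

-- the zipped-pairs pass over the boundary list equals the run-length view
theorem pairs_eq_bGo (xs : List (String × Int × Int)) :
    ∀ (fuel : Nat) (l : List (String × Int × Int)) (i : Nat), l.length ≤ fuel → xs.drop i = l →
      (((gStarts i l ++ [xs.length]).zip (gStarts i l ++ [xs.length]).tail).filterMap
        (fun se => if se.2 - se.1 > 1 then
            some ((xs.getD se.1 ("", 0, 0)).1, (se.2 : Int) - (se.1 : Int), (se.1 : Int))
          else none)) = bGo i l := by
  intro fuel
  induction fuel with
  | zero =>
    intro l i hf hd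
    match l, hf with
    | [], _ => simp [gStarts, bGo]
  | succ fuel ih =>
    intro l i hf hd
    match l, hd with
    | [], hd => simp [gStarts, bGo]
    | (b, x, y) :: rest, hd =>
      have hlt : i < xs.length := by
        by_contra hge
        have : xs.drop i = [] := List.drop_eq_nil_iff.mpr (by omega)
        simp [this] at hd
      set k := (span1 b rest).1 with hk
      set rest' := (span1 b rest).2 with hr
      have hdropr : xs.drop (i + 1) = rest := by
        have h2 := congrArg (List.drop 1) hd
        rw [List.drop_drop] at h2
        simpa using h2
      have hdrop' : xs.drop (i + k + 1) = rest' := by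
        have := congrArg (List.drop k) hdropr
        rw [List.drop_drop, span1_drop] at this
        rw [show i + k + 1 = i + 1 + k from by omega]
        simpa [← hr, ← hk] using this
      have hlen' : xs.length - (i + k + 1) = rest'.length := by
        have h0 := congrArg List.length hdrop'
        have h1 := congrArg List.length hd
        simp at h0 h1
        omega
      have hget0 : xs.getD i ("", 0, 0) = (b, x, y) := by
        have := getD_drop xs i 0 _ hd (by simp)
        simpa using this
      -- the next boundary after i is always i + k + 1
      have hnext : ∃ u, gStarts (i + k + 1) rest' ++ [xs.length] = (i + k + 1) :: u := by
        match hrnil : rest' with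
        | [] =>
          refine ⟨[], ?_⟩
          have : xs.length = i + k + 1 := by
            have h1 := congrArg List.length hd
            have h2 : (span1 b rest).1 ≤ rest.length := span1_fst_le b rest
            simp at h1 hlen'
            omega
          simp [gStarts, this]
        | p :: rest'' =>
          exact ⟨_, by rw [gStarts, List.cons_append]⟩
      obtain ⟨u, hu⟩ := hnext
      rw [gStarts]
      have hcons : (i :: gStarts (i + (span1 b rest).1 + 1) (span1 b rest).2) ++ [xs.length]
          = i :: ((i + k + 1) :: u) := by
        simp [← hk, ← hr, hu]
      rw [hcons]
      have hzip : ((i :: (i + k + 1) :: u).zip ((i :: (i + k + 1) :: u)).tail)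
          = (i, i + k + 1) :: (((i + k + 1) :: u).zip (((i + k + 1) :: u)).tail) := by
        simp [List.zip]
      rw [hzip, List.filterMap_cons]
      have hbgo : bGo i ((b, x, y) :: rest) =
          (if k + 1 > 1 then [(b, ((k + 1 : Nat) : Int), (i : Int))] else []) ++
            bGo (i + (k + 1)) rest' := by
        rw [bGo.eq_def]
      rw [hbgo]
      have hflen : rest'.length ≤ fuel := by
        have h1 : rest'.length ≤ rest.length := by rw [hr]; exact span1_len_le b rest
        have h2 : ((b, x, y) :: rest).length = rest.length + 1 := by simp
        omega
      have hrec := ih rest' (i + k + 1) hflen hdrop'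
      rw [hu] at hrec
      by_cases hgt : k + 1 > 1
      · rw [if_pos (by omega : i + k + 1 - i > 1), if_pos hgt]
        rw [show i + (k + 1) = i + k + 1 from by omega, ← hrec]
        have hb : (xs[i]?.getD ("", 0, 0)).1 = b := by
          simpa [List.getD] using congrArg Prod.fst hget0
        simp [hb]
        omega
      · rw [if_neg (by omega : ¬ i + k + 1 - i > 1), if_neg hgt]
        rw [show i + (k + 1) = i + k + 1 from by omega, ← hrec]
        simp

-- ===== VERDICT (by name: the statement is the Claim_ definition above) =====
theorem get_repeated_sequences_spec : Claim_equal_get_repeated_sequences := by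
  intro xs _
  unfold Spec_get_repeated_sequences get_repeated_sequences get_repeated_sequences_alt
  rw [aOuter_eq_bGo xs xs.length 0 [] (by omega)]
  simp only [List.nil_append, List.drop_zero]
  unfold bBoundaries
  rw [show List.range xs.length = List.range' 0 xs.length from by simp [List.range_eq_range']]
  rw [show xs.length = xs.length - 0 from by omega] 
  rw [filter_range_eq_gStarts xs xs.length xs 0 (by omega) (by simp) (Or.inl rfl)]
  rw [show xs.length - 0 = xs.length from by omega]
  exact (pairs_eq_bGo xs xs.length xs 0 (by omega) (by simp)).symm
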